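-- pv_equiv track=rewrite | github.com/chanyoonzhu/leetcode-python | google/Google-Bank_Wait_Time.py | calcWaitTime
-- ===== SOURCE A (Python) =====
-- import heapq
-- import heapq
--
-- def calcWaitTime(efficiency: list, customers: int) -> int:
--     h = [(time, i) for i, time in enumerate(efficiency)] # end_time, index
--     heapq.heapify(h)
--     served, cur_time = len(efficiency), 0
--     while served < customers:
--         end_time, idx = heapq.heappop(h)
--         heapq.heappush(h, (end_time + efficiency[idx], idx))
--         cur_time = end_time
--         served += 1
--     return cur_time
-- ===== SOURCE B (Python) =====
-- def calcWaitTime(efficiency: list, customers: int) -> int: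
--     # binary search on time: the answer is the least t with sum(t // e) >= extra customers
--     m = customers - len(efficiency)
--     if m <= 0:
--         return 0
--     lo, hi = 1, min(efficiency) * m
--     while lo < hi:
--         mid = (lo + hi) // 2
--         if sum(mid // e for e in efficiency) >= m:
--             hi = mid
--         else:
--             lo = mid + 1
--     return lo
-- ===== Notes on version B (the rewrite author's own statement) =====
-- stated objective: faster
-- what changed: Replaced the heap simulation that pops each of the (customers - n) extra service completions one by one with a binary search on time t for the least t such that sum(t // e for e in efficiency) reaches the number of extra customers.
-- outside the precondition, e.g. on calcWaitTime([0], 2): A returns 0, B returns 1; on calcWaitTime([-2], 2): A returns -2, B returns 1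
import Mathlib
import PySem

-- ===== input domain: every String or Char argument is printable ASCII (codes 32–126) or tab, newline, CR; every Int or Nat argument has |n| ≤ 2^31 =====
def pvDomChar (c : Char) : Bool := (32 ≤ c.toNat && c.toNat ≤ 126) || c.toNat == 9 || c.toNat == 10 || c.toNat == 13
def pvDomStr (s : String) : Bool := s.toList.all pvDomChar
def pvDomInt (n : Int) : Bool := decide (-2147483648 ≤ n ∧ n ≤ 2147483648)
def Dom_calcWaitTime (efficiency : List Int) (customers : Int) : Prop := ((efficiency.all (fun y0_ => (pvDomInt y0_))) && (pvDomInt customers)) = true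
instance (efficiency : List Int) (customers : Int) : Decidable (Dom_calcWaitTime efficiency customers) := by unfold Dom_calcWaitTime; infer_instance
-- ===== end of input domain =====

-- B replaces A's one-pop-per-customer heap simulation with a binary search on time
-- for the least t with sum(t // e) >= extra customers (objective: faster).


-- ===== PORT A =====
-- heapq's order on (end_time, index) pairs: Python tuple comparison, lexicographic
def pvLexLe (a b : Int × Int) : Bool := a.1 < b.1 || (a.1 == b.1 && a.2 ≤ b.2)

-- heapq.heappop modelled on the heap's multiset of entries: remove the lexicographically
-- least pair (exactly the pair heappop returns); `none` = IndexError on the empty heap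
def pvPopMin : List (Int × Int) → Option ((Int × Int) × List (Int × Int))
  | [] => none
  | x :: xs =>
    match pvPopMin xs with
    | none => some (x, [])
    | some (y, rest) => if pvLexLe x y then some (x, xs) else some (y, x :: rest)

-- the while loop: `served` starts at len(efficiency) and increases by 1 per iteration,
-- so `while served < customers` runs exactly (customers - served).toNat times (the fuel);
-- heappush appends the new entry (the heap is a multiset, pvPopMin finds the least)
def pvLoopA (es : List Int) : Nat → List (Int × Int) → Int → Int
  | 0, _, cur => cur
  | k + 1, h, cur =>
    match pvPopMin h with
    | none => cur  -- Python raises IndexError here (heap empty); excluded by Pre_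
    | some ((endTime, idx), rest) =>
        pvLoopA es k (rest ++ [(endTime + PySem.List.pyGetD es idx 0, idx)]) endTime

def calcWaitTime (efficiency : List Int) (customers : Int) : Int :=
  let h := (PySem.List.enumerate efficiency 0).map (fun p => (p.2, p.1))
  pvLoopA efficiency (customers - (efficiency.length : Int)).toNat h 0

-- ===== PORT B =====
-- sum(t // e for e in efficiency)
def pvCount (es : List Int) (t : Int) : Int :=
  es.foldl (fun acc e => acc + PySem.Int.floordiv t e) 0

-- the `while lo < hi` binary-search loop
def pvBS (es : List Int) (m lo hi : Int) : Int :=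
  if _h : lo < hi then
    let mid := PySem.Int.floordiv (lo + hi) 2
    if m ≤ pvCount es mid then pvBS es m lo mid else pvBS es m (mid + 1) hi
  else lo
termination_by (hi - lo).toNat
decreasing_by
  all_goals
    have h2 := PySem.Int.floordiv_eq_ediv_of_pos (a := lo + hi) (b := 2) (by omega)
    simp only [h2] at *
    omega

def calcWaitTime_alt (efficiency : List Int) (customers : Int) : Int :=
  let m := customers - (efficiency.length : Int)
  if m ≤ 0 then 0
  else
    match PySem.List.min? efficiency (fun x => x) with
    | none => 0  -- Python raises ValueError (min of empty list); excluded by Pre_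
    | some mn => pvBS efficiency m 1 (mn * m)

-- ===== PRECONDITION & SPEC =====
-- Pre_ restricts to the task's natural domain: when there are extra customers to serve, the
-- service times must be positive and the teller list nonempty (on the empty list A raises
-- IndexError; zero/negative "efficiencies" are outside the natural domain of service times).
def Pre_calcWaitTime (efficiency : List Int) (customers : Int) : Prop :=
  customers ≤ (efficiency.length : Int) ∨ (efficiency ≠ [] ∧ ∀ e ∈ efficiency, 0 < e)
instance (efficiency : List Int) (customers : Int) : Decidable (Pre_calcWaitTime efficiency customers) := by
  unfold Pre_calcWaitTime; infer_instance

def pvWitness_calcWaitTime : List Int × Int := ([2, 3], 7)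

def Spec_calcWaitTime (efficiency : List Int) (customers : Int) (out : Int) : Prop := out = calcWaitTime_alt efficiency customers
instance (efficiency : List Int) (customers : Int) (out : Int) : Decidable (Spec_calcWaitTime efficiency customers out) := by unfold Spec_calcWaitTime; infer_instance

-- ===== CLAIM (what is proved, stated in full; the proofs are below) =====
def Claim_equal_calcWaitTime : Prop := ∀ (efficiency : List Int) (customers : Int), Dom_calcWaitTime efficiency customers → Pre_calcWaitTime efficiency customers → Spec_calcWaitTime efficiency customers (calcWaitTime efficiency customers)

-- ===== LEMMAS AND PROOFS =====

theorem pvLexLe_refl (a : Int × Int) : pvLexLe a a = true := by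
  simp [pvLexLe]

theorem pvLexLe_of_not (a b : Int × Int) (h : ¬ pvLexLe a b = true) : pvLexLe b a = true := by
  simp [pvLexLe] at *; omega

theorem pvLexLe_trans (a b c : Int × Int) (h1 : pvLexLe a b = true) (h2 : pvLexLe b c = true) :
    pvLexLe a c = true := by
  simp [pvLexLe] at *; omega

theorem pvLexLe_fst (a b : Int × Int) (h : pvLexLe a b = true) : a.1 ≤ b.1 := by
  simp [pvLexLe] at h; omega

theorem pvPopMin_eq_none_iff (h : List (Int × Int)) : pvPopMin h = none ↔ h = [] := by
  cases h with
  | nil => simp [pvPopMin]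
  | cons x xs =>
    cases hx : pvPopMin xs with
    | none => simp [pvPopMin, hx]
    | some pr =>
      rcases pr with ⟨y, rest⟩
      simp only [pvPopMin, hx]
      split <;> simp

/-- pvPopMin returns a least element (w.r.t. pvLexLe) and the rest is a permutation complement. -/
theorem pvPopMin_spec (h : List (Int × Int)) (p : Int × Int) (rest : List (Int × Int))
    (hp : pvPopMin h = some (p, rest)) :
    p ∈ h ∧ h.Perm (p :: rest) ∧ ∀ q ∈ h, pvLexLe p q = true := by
  induction h generalizing p rest with
  | nil => simp [pvPopMin] at hp
  | cons x xs ih =>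
    cases hx : pvPopMin xs with
    | none =>
      have hxs : xs = [] := (pvPopMin_eq_none_iff xs).1 hx
      subst hxs
      simp only [pvPopMin] at hp
      simp only [Option.some.injEq, Prod.mk.injEq] at hp
      obtain ⟨rfl, rfl⟩ := hp
      exact ⟨by simp, by simp, by intro q hq; simp at hq; subst hq; exact pvLexLe_refl _⟩
    | some pr =>
      rcases pr with ⟨y, r⟩
      obtain ⟨hy_mem, hy_perm, hy_min⟩ := ih y r hx
      simp only [pvPopMin, hx] at hp
      by_cases hle : pvLexLe x y = true
      · rw [if_pos hle] at hp
        simp only [Option.some.injEq, Prod.mk.injEq] at hp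
        obtain ⟨rfl, rfl⟩ := hp
        refine ⟨by simp, List.Perm.refl _, ?_⟩
        intro q hq
        rcases List.mem_cons.1 hq with rfl | hq
        · exact pvLexLe_refl _
        · exact pvLexLe_trans _ _ _ hle (hy_min q hq)
      · rw [if_neg hle] at hp
        simp only [Option.some.injEq, Prod.mk.injEq] at hp
        obtain ⟨rfl, rfl⟩ := hp
        refine ⟨List.mem_cons_of_mem _ hy_mem, ?_, ?_⟩
        · exact (hy_perm.cons x).trans (List.Perm.swap _ _ _)
        · intro q hq
          rcases List.mem_cons.1 hq with rfl | hq
          · exact pvLexLe_of_not _ _ hle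
          · exact hy_min q hq

/-- The heap entry of teller `i` when it has completed `c i` services. -/
def pvEntry (es : List Int) (c : ℕ → ℕ) (i : ℕ) : Int × Int :=
  (es.getD i 0 * ((c i : Int) + 1), (i : Int))

/-- Invariant on the loop state: all completed services end by `cur`, no pending one ends before. -/
def pvInv (es : List Int) (c : ℕ → ℕ) (cur : Int) : Prop :=
  (∀ i < es.length, es.getD i 0 * (c i : Int) ≤ cur) ∧
  (∀ i < es.length, cur ≤ es.getD i 0 * ((c i : Int) + 1))

theorem pvLoopA_spec (es : List Int) (hpos : ∀ e ∈ es, 0 < e) (hne : es ≠ []) :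
    ∀ (k : ℕ) (c : ℕ → ℕ) (cur : Int) (h : List (Int × Int)),
      h.Perm ((List.range es.length).map (pvEntry es c)) →
      pvInv es c cur →
      ∃ c', pvInv es c' (pvLoopA es k h cur) ∧
        (∑ j ∈ Finset.range es.length, c' j) = (∑ j ∈ Finset.range es.length, c j) + k ∧
        ((k = 0 ∧ pvLoopA es k h cur = cur ∧ c' = c) ∨
         (∃ j < es.length, 1 ≤ c' j ∧
            es.getD j 0 * (c' j : Int) = pvLoopA es k h cur)) := by
  intro k
  induction k with
  | zero =>
    intro c cur h _ hinv
    exact ⟨c, hinv, by simp, Or.inl ⟨rfl, rfl, rfl⟩⟩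
  | succ k ih =>
    intro c cur h hperm hinv
    -- the heap is nonempty
    have hlen : h.length = es.length := by
      have := hperm.length_eq; simpa using this
    have hhne : h ≠ [] := by
      intro hnil
      apply hne
      cases es with
      | nil => rfl
      | cons e es' => subst hnil; simp at hlen
    obtain ⟨pr, hpop⟩ : ∃ pr, pvPopMin h = some pr := by
      cases hpm : pvPopMin h with
      | none => exact absurd ((pvPopMin_eq_none_iff h).1 hpm) hhne
      | some pr => exact ⟨pr, rfl⟩
    rcases pr with ⟨⟨v, idx⟩, rest⟩
    obtain ⟨hmem, hperm2, hmin⟩ := pvPopMin_spec h (v, idx) rest hpop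
    -- identify the popped pair as the entry of some teller i
    have hmem2 : (v, idx) ∈ (List.range es.length).map (pvEntry es c) := hperm.mem_iff.1 hmem
    obtain ⟨i, hi_mem, hi_eq⟩ := List.mem_map.1 hmem2
    have hi : i < es.length := List.mem_range.1 hi_mem
    have hv : v = es.getD i 0 * ((c i : Int) + 1) := by
      have := congrArg Prod.fst hi_eq; simpa [pvEntry] using this.symm
    have hidx : idx = (i : Int) := by
      have := congrArg Prod.snd hi_eq; simpa [pvEntry] using this.symm
    have hei_pos : 0 < es.getD i 0 := hpos _ (by
      rw [List.getD_eq_getElem _ _ hi]; exact List.getElem_mem hi)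
    -- the new counts
    set c' : ℕ → ℕ := Function.update c i (c i + 1) with hc'
    -- unfold one loop step
    have hstep : pvLoopA es (k + 1) h cur =
        pvLoopA es k (rest ++ [(v + PySem.List.pyGetD es idx 0, idx)]) v := by
      simp [pvLoopA, hpop]
    -- the pushed entry is teller i's next entry
    have hpush : (v + PySem.List.pyGetD es idx 0, idx) = pvEntry es c' i := by
      subst hidx hv
      simp only [PySem.List.pyGetD_natCast, pvEntry, hc', Function.update_self]
      congr 1
      push_cast; ring
    -- new heap is a permutation of the entries for c'
    have hrange_perm : (List.range es.length).Perm (i :: (List.range es.length).erase i) :=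
      List.perm_cons_erase hi_mem
    have hnotmem : i ∉ (List.range es.length).erase i :=
      fun hmm => (List.Nodup.mem_erase_iff (List.nodup_range)).1 hmm |>.1 rfl
    have hmap_agree : ((List.range es.length).erase i).map (pvEntry es c) =
        ((List.range es.length).erase i).map (pvEntry es c') := by
      apply List.map_congr_left
      intro j hj
      have hji : j ≠ i := (List.Nodup.mem_erase_iff (List.nodup_range)).1 hj |>.1
      simp [pvEntry, hc', Function.update_of_ne hji]
    have hrest : rest.Perm (((List.range es.length).erase i).map (pvEntry es c)) := by
      have p1 : ((v, idx) :: rest).Perm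
          ((pvEntry es c i) :: ((List.range es.length).erase i).map (pvEntry es c)) :=
        hperm2.symm.trans (hperm.trans (hrange_perm.map (pvEntry es c)))
      have hvi : (v, idx) = pvEntry es c i := hi_eq.symm
      rw [hvi] at p1
      exact p1.cons_inv
    have hheap' : (rest ++ [(v + PySem.List.pyGetD es idx 0, idx)]).Perm
        ((List.range es.length).map (pvEntry es c')) := by
      refine List.perm_append_comm.trans ?_
      rw [hpush]
      refine (hrest.cons _).trans ?_
      rw [hmap_agree]
      exact (hrange_perm.map (pvEntry es c')).symm
    -- cur ≤ v
    have hcurv : cur ≤ v := by rw [hv]; exact hinv.2 i hi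
    -- invariant for the new state
    have hinv' : pvInv es c' v := by
      constructor
      · intro j hj
        by_cases hji : j = i
        · subst hji
          simp only [hc', Function.update_self]
          rw [hv]; push_cast; exact le_of_eq (by ring)
        · simp only [hc', Function.update_of_ne hji]
          exact le_trans (hinv.1 j hj) hcurv
      · intro j hj
        by_cases hji : j = i
        · subst hji
          simp only [hc', Function.update_self]
          rw [hv]; push_cast; nlinarith
        · simp only [hc', Function.update_of_ne hji]
          have hq : pvEntry es c j ∈ h := by
            apply hperm.mem_iff.2
            exact List.mem_map.2 ⟨j, List.mem_range.2 hj, rfl⟩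
          have := pvLexLe_fst _ _ (hmin _ hq)
          simpa [pvEntry] using this
    -- sums
    have hsum' : (∑ j ∈ Finset.range es.length, c' j)
        = (∑ j ∈ Finset.range es.length, c j) + 1 := by
      have hmem : i ∈ Finset.range es.length := Finset.mem_range.2 hi
      rw [hc', Finset.sum_update_of_mem hmem]
      have h2 := Finset.add_sum_erase (Finset.range es.length) c hmem
      rw [Finset.erase_eq] at h2
      omega
    -- apply the induction hypothesis
    obtain ⟨c'', hinv'', hsum'', hwit⟩ :=
      ih c' v (rest ++ [(v + PySem.List.pyGetD es idx 0, idx)]) hheap' hinv'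
    refine ⟨c'', ?_, ?_, ?_⟩
    · rw [hstep]; exact hinv''
    · rw [hsum'] at hsum''; omega
    · right
      rcases hwit with ⟨hk0, heq, hcc⟩ | ⟨j, hj, hj1, hjeq⟩
      · refine ⟨i, hi, ?_, ?_⟩
        · rw [hcc, hc', Function.update_self]; omega
        · rw [hstep, heq, hcc, hc', Function.update_self, hv]; push_cast; ring
      · exact ⟨j, hj, hj1, by rw [hstep]; exact hjeq⟩

/-- pvCount as a sum over indices. -/
theorem pvCount_eq_sum (es : List Int) (t : Int) :
    pvCount es t = ∑ j ∈ Finset.range es.length, PySem.Int.floordiv t (es.getD j 0) := by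
  suffices hgen : ∀ a : Int, es.foldl (fun acc e => acc + PySem.Int.floordiv t e) a
      = a + ∑ j ∈ Finset.range es.length, PySem.Int.floordiv t (es.getD j 0) by
    simpa [pvCount] using hgen 0
  induction es with
  | nil => simp
  | cons e es ih =>
    intro a
    simp only [List.foldl_cons, ih, List.length_cons]
    rw [Finset.sum_range_succ']
    simp only [List.getD_cons_succ, List.getD_cons_zero]
    ring

theorem pvCount_mono (es : List Int) (hpos : ∀ e ∈ es, 0 < e) (s t : Int) (hst : s ≤ t) :
    pvCount es s ≤ pvCount es t := by
  rw [pvCount_eq_sum, pvCount_eq_sum]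
  apply Finset.sum_le_sum
  intro j hj
  have hj' : j < es.length := Finset.mem_range.1 hj
  have hej : 0 < es.getD j 0 := hpos _ (by
    rw [List.getD_eq_getElem _ _ hj']; exact List.getElem_mem hj')
  rw [PySem.Int.floordiv_eq_ediv_of_pos hej, PySem.Int.floordiv_eq_ediv_of_pos hej]
  exact Int.ediv_le_ediv hej hst

/-- Correctness of the binary-search loop: it finds the (given) least `t` with `m ≤ pvCount es t`. -/
theorem pvBS_eq (es : List Int) (hpos : ∀ e ∈ es, 0 < e) (m tgt : Int)
    (hP : m ≤ pvCount es tgt) (hlt : ∀ t, t < tgt → pvCount es t < m) :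
    ∀ (fuel : ℕ) (lo hi : Int), (hi - lo).toNat ≤ fuel → lo ≤ tgt → tgt ≤ hi →
      pvBS es m lo hi = tgt := by
  intro fuel
  induction fuel with
  | zero =>
    intro lo hi hf hlo hhi
    have : ¬ lo < hi := by omega
    rw [pvBS, dif_neg this]
    omega
  | succ fuel ih =>
    intro lo hi hf hlo hhi
    by_cases hlh : lo < hi
    · rw [pvBS, dif_pos hlh]
      have hmid : lo ≤ PySem.Int.floordiv (lo + hi) 2 ∧ PySem.Int.floordiv (lo + hi) 2 < hi := by
        rw [PySem.Int.floordiv_eq_ediv_of_pos (by omega : (0:Int) < 2)]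
        omega
      set mid := PySem.Int.floordiv (lo + hi) 2 with hmiddef
      by_cases hc : m ≤ pvCount es mid
      · rw [if_pos hc]
        have htm : tgt ≤ mid := by
          by_contra hcon
          exact absurd hc (by push_neg; exact hlt mid (by omega))
        exact ih lo mid (by omega) hlo htm
      · rw [if_neg hc]
        have hmt : mid < tgt := by
          by_contra hcon
          exact hc (le_trans hP (pvCount_mono es hpos tgt mid (by omega)))
        exact ih (mid + 1) hi (by omega) (by omega) hhi
    · rw [pvBS, dif_neg hlh]
      omega

/-- The initial heap is the entry list for zero counts. -/
theorem pvInitHeap (es : List Int) :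
    (PySem.List.enumerate es 0).map (fun p => (p.2, p.1))
      = (List.range es.length).map (pvEntry es (fun _ => 0)) := by
  apply List.ext_getElem
  · simp [PySem.List.length_enumerate]
  · intro k h1 h2
    have hk : k < es.length := by simpa [PySem.List.length_enumerate] using h1
    simp [PySem.List.getElem_enumerate, pvEntry, List.getD, List.getElem?_eq_getElem hk]

-- ===== VERDICT (by name: the statement is the Claim_ definition above) =====
theorem calcWaitTime_spec : Claim_equal_calcWaitTime := by
  intro es customers _ hpre
  unfold Spec_calcWaitTime
  by_cases hm : customers - (es.length : Int) ≤ 0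
  · -- no extra customers: both sides return 0 / the initial cur
    have hA : calcWaitTime es customers = 0 := by
      have h0 : (customers - (es.length : Int)).toNat = 0 := by omega
      simp [calcWaitTime, h0, pvLoopA]
    have hB : calcWaitTime_alt es customers = 0 := by
      simp [calcWaitTime_alt, hm]
    rw [hA, hB]
  · -- extra customers: Pre_ gives a nonempty list of positive efficiencies
    have hpre' : es ≠ [] ∧ ∀ e ∈ es, 0 < e := by
      rcases hpre with h | h
      · exfalso; omega
      · exact h
    obtain ⟨hne, hpos⟩ := hpre'
    set m : Int := customers - (es.length : Int) with hmdef
    have hmpos : 0 < m := by omega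
    have hgetDpos : ∀ j < es.length, 0 < es.getD j 0 := by
      intro j hj
      exact hpos _ (by rw [List.getD_eq_getElem _ _ hj]; exact List.getElem_mem hj)
    -- characterize A's result
    have hinv0 : pvInv es (fun _ => 0) 0 := by
      constructor
      · intro i hi; simp
      · intro i hi
        simpa using (hgetDpos i hi).le
    obtain ⟨c', hinv', hsum', hwit⟩ := pvLoopA_spec es hpos hne m.toNat (fun _ => 0) 0
      ((PySem.List.enumerate es 0).map (fun p => (p.2, p.1)))
      (by rw [pvInitHeap]) hinv0
    set r : Int := pvLoopA es m.toNat ((PySem.List.enumerate es 0).map (fun p => (p.2, p.1))) 0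
      with hrdef
    have hsum : (∑ j ∈ Finset.range es.length, c' j) = m.toNat := by simpa using hsum'
    obtain ⟨j0, hj0, hj0_1, hj0_eq⟩ : ∃ j < es.length, 1 ≤ c' j ∧
        es.getD j 0 * (c' j : Int) = r := by
      rcases hwit with ⟨hk0, _, _⟩ | hw
      · exfalso; omega
      · exact hw
    -- (c) 1 ≤ r
    have hr1 : 1 ≤ r := by
      rw [← hj0_eq]
      have := hgetDpos j0 hj0
      nlinarith [hj0_1]
    -- (a) m ≤ pvCount es r
    have hPr : m ≤ pvCount es r := by
      rw [pvCount_eq_sum]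
      have hle : ∀ j ∈ Finset.range es.length,
          (c' j : Int) ≤ PySem.Int.floordiv r (es.getD j 0) := by
        intro j hj
        have hj' : j < es.length := Finset.mem_range.1 hj
        have hej := hgetDpos j hj'
        rw [PySem.Int.floordiv_eq_ediv_of_pos hej, Int.le_ediv_iff_mul_le hej, mul_comm]
        exact hinv'.1 j hj'
      calc m = ((∑ j ∈ Finset.range es.length, c' j : ℕ) : Int) := by
            rw [hsum]; exact (Int.toNat_of_nonneg hmpos.le).symm
        _ = ∑ j ∈ Finset.range es.length, (c' j : Int) := by push_cast; rfl
        _ ≤ _ := Finset.sum_le_sum hle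
    -- (b) every earlier time counts fewer than m completions
    have hlt : ∀ t, t < r → pvCount es t < m := by
      intro t ht
      rw [pvCount_eq_sum]
      have hstrict : (∑ j ∈ Finset.range es.length, PySem.Int.floordiv t (es.getD j 0))
          < ∑ j ∈ Finset.range es.length, (c' j : Int) := by
        apply Finset.sum_lt_sum
        · intro j hj
          have hj' : j < es.length := Finset.mem_range.1 hj
          have hej := hgetDpos j hj'
          rw [PySem.Int.floordiv_eq_ediv_of_pos hej]
          have hub := hinv'.2 j hj'
          have h1 : t < ((c' j : Int) + 1) * es.getD j 0 := by nlinarith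
          exact Int.lt_add_one_iff.mp ((Int.ediv_lt_iff_lt_mul hej).2 h1)
        · refine ⟨j0, Finset.mem_range.2 hj0, ?_⟩
          have hej := hgetDpos j0 hj0
          rw [PySem.Int.floordiv_eq_ediv_of_pos hej]
          have : t < (c' j0 : Int) * es.getD j0 0 := by nlinarith [hj0_eq]
          exact (Int.ediv_lt_iff_lt_mul hej).2 this
      have hsum2 : (∑ j ∈ Finset.range es.length, (c' j : Int)) = m := by
        rw [← Nat.cast_sum, hsum]; exact Int.toNat_of_nonneg hmpos.le
      rw [hsum2] at hstrict
      exact hstrict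
    -- B's side: min exists and bounds the search
    obtain ⟨mn, hmn⟩ : ∃ mn, PySem.List.min? es (fun x => x) = some mn := by
      cases hq : PySem.List.min? es (fun x => x) with
      | none => exact absurd ((PySem.List.min?_eq_none_iff es (fun x => x)).1 hq) hne
      | some mn => exact ⟨mn, rfl⟩
    have hmn_mem : mn ∈ es := PySem.List.min?_mem hmn
    have hmn_pos : 0 < mn := hpos _ hmn_mem
    -- r ≤ mn * m because mn * m already admits m completions
    have hcount_top : m ≤ pvCount es (mn * m) := by
      obtain ⟨j1, hj1, hj1eq⟩ := List.mem_iff_getElem.1 hmn_mem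
      rw [pvCount_eq_sum]
      have hterm : PySem.Int.floordiv (mn * m) (es.getD j1 0) = m := by
        rw [List.getD_eq_getElem _ _ hj1, hj1eq,
          PySem.Int.floordiv_eq_ediv_of_pos hmn_pos, mul_comm, Int.mul_ediv_cancel _ (by omega)]
      calc m = PySem.Int.floordiv (mn * m) (es.getD j1 0) := hterm.symm
        _ ≤ _ := by
            refine Finset.single_le_sum (f := fun j => PySem.Int.floordiv (mn * m) (es.getD j 0))
              (fun j hj => ?_) (Finset.mem_range.2 hj1)
            show 0 ≤ PySem.Int.floordiv (mn * m) (es.getD j 0)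
            have hej := hgetDpos j (Finset.mem_range.1 hj)
            rw [PySem.Int.floordiv_eq_ediv_of_pos hej]
            exact Int.ediv_nonneg (mul_nonneg hmn_pos.le hmpos.le) hej.le
    have hrtop : r ≤ mn * m := by
      by_contra hcon
      exact absurd hcount_top (by push_neg; exact hlt _ (by omega))
    -- conclude
    have hA : calcWaitTime es customers = r := rfl
    have hB : calcWaitTime_alt es customers = pvBS es m 1 (mn * m) := by
      simp only [calcWaitTime_alt, ← hmdef]
      rw [if_neg (by omega : ¬ m ≤ 0), hmn]
    rw [hA, hB]
    exact (pvBS_eq es hpos m r hPr hlt (mn * m - 1).toNat 1 (mn * m) (by omega) hr1 hrtop).symm
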